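-- pv_equiv track=rewrite | github.com/djjkelly/Advent-of-Code | 2023/2023_Day12_Part1.py | count_possibilities
-- ===== SOURCE A (Python) =====
-- def count_possibilities(input_list,damaged_group_sizes):
--     count = 0
--     for string in input_list:
--         group_sizes = []
--         group_size = 0
--         for character in string:
--             if character == '#' or character == '1':
--                 group_size += 1
--             if character == '.' or character == '0':
--                 if group_size > 0:
--                     group_sizes.append(str(group_size))
--                 group_size = 0
--         if group_size > 0:
--             group_sizes.append(str(group_size))
--         if group_sizes == damaged_group_sizes:
--             count += 1
--     return count
-- ===== SOURCE B (Python) =====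
-- def count_possibilities(input_list, damaged_group_sizes):
--     def run_sizes(s):
--         segments = ''.join('.' if c == '0' else c for c in s).split('.')
--         return [str(n) for n in (sum(c in '#1' for c in seg) for seg in segments) if n > 0]
--     return sum(run_sizes(s) == damaged_group_sizes for s in input_list)
-- ===== Notes on version B (the rewrite author's own statement) =====
-- stated objective: idiomatic
-- what changed: Replaces the per-character flush-on-separator accumulator with a split-then-reduce: each string is cut at '.'/'0' separators and each segment's '#'/'1' count is collected, with the outer loop folded into a sum of boolean comparisons.
import Mathlib
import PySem

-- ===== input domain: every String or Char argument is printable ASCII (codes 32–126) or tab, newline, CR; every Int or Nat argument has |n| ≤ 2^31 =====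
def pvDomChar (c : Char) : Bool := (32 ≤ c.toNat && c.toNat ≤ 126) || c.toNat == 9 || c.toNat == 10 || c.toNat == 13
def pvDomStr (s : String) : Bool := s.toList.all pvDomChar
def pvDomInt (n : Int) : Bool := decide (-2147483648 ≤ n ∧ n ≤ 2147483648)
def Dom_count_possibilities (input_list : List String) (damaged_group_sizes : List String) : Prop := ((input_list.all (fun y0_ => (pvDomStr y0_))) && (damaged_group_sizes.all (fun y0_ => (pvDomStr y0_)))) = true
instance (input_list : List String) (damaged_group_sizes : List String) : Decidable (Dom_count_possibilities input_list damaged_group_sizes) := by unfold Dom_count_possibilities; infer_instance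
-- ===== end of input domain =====

-- B replaces A's per-character flush-on-separator accumulator by a split-then-reduce over segments (idiomatic decomposition, same cost).


-- ===== PORT A =====
-- the inner loop body: the two ifs of A, in order
def pvStepA (st : List String × Int) (c : Char) : List String × Int :=
  let st := if c == '#' || c == '1' then (st.1, st.2 + 1) else st
  if c == '.' || c == '0' then (if 0 < st.2 then st.1 ++ [PySem.Int.toStr st.2] else st.1, 0) else st

-- per-string body of A's outer loop: run the char loop, then the trailing flush
def pvAGroups (s : String) : List String :=
  let r := s.toList.foldl pvStepA ([], 0)
  if 0 < r.2 then r.1 ++ [PySem.Int.toStr r.2] else r.1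

def count_possibilities (input_list : List String) (damaged_group_sizes : List String) : Int :=
  input_list.foldl (fun count s =>
    if pvAGroups s == damaged_group_sizes then count + 1 else count) 0

-- ===== PORT B =====
def pvRepl (c : Char) : Char := if c == '0' then '.' else c
def pvCnt (seg : List Char) : Int := (seg.countP (fun c => c == '#' || c == '1') : Int)
-- run_sizes: split at '.' (after mapping '0' to '.'), count '#'/'1' per segment, keep positive counts as strings
def pvRunSizes (s : String) : List String :=
  ((PySem.Chars.splitOn (s.toList.map pvRepl) ['.']).map pvCnt).filterMap
    (fun n => if 0 < n then some (PySem.Int.toStr n) else none)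

def count_possibilities_alt (input_list : List String) (damaged_group_sizes : List String) : Int :=
  (input_list.countP (fun s => pvRunSizes s == damaged_group_sizes) : Int)

-- ===== PRECONDITION & SPEC =====
def Spec_count_possibilities (input_list : List String) (damaged_group_sizes : List String) (out : Int) : Prop := out = count_possibilities_alt input_list damaged_group_sizes
instance (input_list : List String) (damaged_group_sizes : List String) (out : Int) : Decidable (Spec_count_possibilities input_list damaged_group_sizes out) := by unfold Spec_count_possibilities; infer_instance

-- ===== CLAIM (what is proved, stated in full; the proofs are below) =====
def Claim_equal_count_possibilities : Prop := ∀ (input_list : List String) (damaged_group_sizes : List String), Dom_count_possibilities input_list damaged_group_sizes → Spec_count_possibilities input_list damaged_group_sizes (count_possibilities input_list damaged_group_sizes)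

-- ===== LEMMAS AND PROOFS =====

-- abstract description of the run lengths of a char list, with k pending damaged cells
def pvG : List Char → Int → List String
  | [], k => if 0 < k then [PySem.Int.toStr k] else []
  | c :: cs, k =>
    if c == '.' || c == '0' then (if 0 < k then [PySem.Int.toStr k] else []) ++ pvG cs 0
    else if c == '#' || c == '1' then pvG cs (k + 1)
    else pvG cs k

def pvEmit (n : Int) : Option String := if 0 < n then some (PySem.Int.toStr n) else none

theorem pvFilter_cons (n : Int) (l : List Int) :
    (n :: l).filterMap pvEmit
      = (if 0 < n then [PySem.Int.toStr n] else []) ++ l.filterMap pvEmit := by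
  by_cases h : 0 < n <;> simp [pvEmit, h]

-- PySem's fueled split on a one-char separator is splitOnP
theorem pvSplit_go (fuel : Nat) (l cur : List Char) (acc : List (List Char)) (h : l.length ≤ fuel) :
    PySem.Chars.splitOn.go ['.'] fuel l cur acc
      = acc.reverse ++ (l.splitOnP (· == '.')).modifyHead (cur.reverse ++ ·) := by
  induction fuel generalizing l cur acc with
  | zero =>
    have : l = [] := List.eq_nil_of_length_eq_zero (Nat.le_zero.mp h)
    subst this; simp [PySem.Chars.splitOn.go, List.splitOnP_nil]
  | succ fuel ih =>
    cases l with
    | nil => simp [PySem.Chars.splitOn.go, List.splitOnP_nil]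
    | cons c rest =>
      simp only [PySem.Chars.splitOn.go, List.splitOnP_cons]
      by_cases hc : c = '.'
      · subst hc
        simp only [List.isPrefixOf, beq_self_eq_true, Bool.and_eq_true, and_self, if_true,
          List.length_cons, List.length_nil, List.drop_succ_cons, List.drop_zero]
        rw [ih rest [] _ (by simpa using h)]
        simp only [List.reverse_cons, List.reverse_nil, List.nil_append, List.append_assoc,
          List.cons_append]
        obtain ⟨x, xs, hx⟩ := List.exists_cons_of_ne_nil (List.splitOnP_ne_nil (· == '.') rest)
        simp [hx]
      · have hpre : List.isPrefixOf ['.'] (c :: rest) = false := by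
          simp [List.isPrefixOf]; exact fun h' => (hc h'.symm).elim
        rw [hpre]
        simp only [Bool.false_eq_true, if_false]
        rw [ih rest (c :: cur) acc (by simpa using h)]
        have hne : rest.splitOnP (· == '.') ≠ [] := List.splitOnP_ne_nil _ _
        obtain ⟨s, ss, hss⟩ := List.exists_cons_of_ne_nil hne
        simp [hss, hc]
theorem pvSplit_eq (cs : List Char) :
    PySem.Chars.splitOn cs ['.'] = cs.splitOnP (· == '.') := by
  rw [PySem.Chars.splitOn, pvSplit_go _ _ _ _ (by omega)]
  have hne : cs.splitOnP (· == '.') ≠ [] := List.splitOnP_ne_nil _ _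
  obtain ⟨s, ss, hss⟩ := List.exists_cons_of_ne_nil hne
  simp [hss]

-- B's per-string value, with k added to the first segment's count, is pvG
theorem pvB_eq_G (cs : List Char) (k : Int) :
    ((((cs.map pvRepl).splitOnP (· == '.')).map pvCnt).modifyHead (fun n => k + n)).filterMap pvEmit
      = pvG cs k := by
  induction cs generalizing k with
  | nil =>
    by_cases hk : (0:Int) < k <;>
      simp [List.splitOnP_nil, pvCnt, pvEmit, pvG, hk]
  | cons c cs ih =>
    have hne : (cs.map pvRepl).splitOnP (· == '.') ≠ [] := List.splitOnP_ne_nil _ _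
    obtain ⟨s, ss, hss⟩ := List.exists_cons_of_ne_nil hne
    by_cases hsep : c == '.' || c == '0'
    · have hr : pvRepl c = '.' := by
        rcases Bool.or_eq_true_iff.mp hsep with h | h <;>
          simp_all [pvRepl]
      have h0 := ih 0
      rw [hss] at h0
      simp only [List.map_cons, List.modifyHead_cons, zero_add] at h0
      simp only [List.map_cons, List.splitOnP_cons, hr, beq_self_eq_true, if_true, hss,
        List.modifyHead_cons, pvG, hsep, if_true]
      rw [show pvCnt ([] : List Char) = 0 from rfl, add_zero, pvFilter_cons, h0]
    · have hr : pvRepl c = c := by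
        simp only [pvRepl]
        have : ¬ (c == '0') = true := by
          intro h; exact hsep (by simp [h])
        simp [this]
      have hcdot : ¬ (c == '.') = true := by
        intro h; exact hsep (by simp [h])
      have hczero : ¬ (c == '0') = true := by
        intro h; exact hsep (by simp [h])
      by_cases hhash : c == '#' || c == '1'
      · have h1 := ih (k + 1)
        rw [hss] at h1
        simp only [List.map_cons, List.modifyHead_cons] at h1
        simp only [List.map_cons, List.splitOnP_cons, hr, hcdot, Bool.false_eq_true, if_false,
          hss, List.modifyHead_cons, List.map_cons, pvG, hczero, Bool.false_eq_true, if_false,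
          hhash, if_true]
        have hcc : pvCnt (c :: s) = pvCnt s + 1 := by
          simp [pvCnt, hhash]
        rw [hcc, show k + (pvCnt s + 1) = k + 1 + pvCnt s from by ring, h1]
        simp
      · have h1 := ih k
        rw [hss] at h1
        simp only [List.map_cons, List.modifyHead_cons] at h1
        simp only [List.map_cons, List.splitOnP_cons, hr, hcdot, Bool.false_eq_true, if_false,
          hss, List.modifyHead_cons, List.map_cons, pvG, hczero, Bool.false_eq_true, if_false,
          hhash, if_false]
        have hcc : pvCnt (c :: s) = pvCnt s := by
          simp [pvCnt, hhash]
        rw [hcc, h1]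
        simp

-- A's inner loop, finished by the trailing flush, is pvG
theorem pvA_eq_G (cs : List Char) (gs : List String) (k : Int) :
    (let r := cs.foldl pvStepA (gs, k);
     if 0 < r.2 then r.1 ++ [PySem.Int.toStr r.2] else r.1) = gs ++ pvG cs k := by
  induction cs generalizing gs k with
  | nil =>
    simp only [List.foldl_nil, pvG]
    split <;> simp
  | cons c cs ih =>
    simp only [List.foldl_cons, pvG]
    by_cases hsep : c == '.' || c == '0'
    · have hhash : ¬ (c == '#' || c == '1') = true := by
        rcases Bool.or_eq_true_iff.mp hsep with h | h <;> simp_all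
      simp only [pvStepA, hhash, Bool.false_eq_true, if_false, hsep, if_true]
      rw [ih]
      split <;> simp [List.append_assoc]
    · simp only [hsep, Bool.false_eq_true, if_false]
      by_cases hhash : c == '#' || c == '1'
      · simp only [pvStepA, hhash, if_true, hsep, Bool.false_eq_true, if_false]
        exact ih _ _
      · simp only [pvStepA, hhash, Bool.false_eq_true, if_false, hsep]
        exact ih _ _

-- per-string agreement
theorem pv_string_eq (s : String) : pvAGroups s = pvRunSizes s := by
  rw [pvAGroups, pvA_eq_G, List.nil_append, ← pvB_eq_G s.toList 0]
  have hne : (s.toList.map pvRepl).splitOnP (· == '.') ≠ [] := List.splitOnP_ne_nil _ _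
  obtain ⟨x, xs, hx⟩ := List.exists_cons_of_ne_nil hne
  simp [pvRunSizes, pvSplit_eq, pvEmit, hx]

-- ===== VERDICT (by name: the statement is the Claim_ definition above) =====
theorem count_possibilities_spec : Claim_equal_count_possibilities := by
  intro input_list damaged_group_sizes _
  show _ = _
  unfold count_possibilities count_possibilities_alt
  rw [PySem.List.foldl_if_add_one (fun s => pvAGroups s == damaged_group_sizes)]
  rw [List.countP_congr (fun s _ => by rw [pv_string_eq s])]
  simp
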